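-- pv_equiv track=rewrite | github.com/bakhda777/coint4 | coint4/src/coint2/pipeline/walk_forward_orchestrator.py | _compute_pair_trailing_streaks
-- ===== SOURCE A (Python) =====
-- def _compute_pair_trailing_streaks(
--     history_window: list[list[tuple[str, str]]],
-- ) -> dict[tuple[str, str], int]:
--     """Compute trailing consecutive presence streak for each historical pair."""
--     if not history_window:
--         return {}
--     all_pairs = {pair for step in history_window for pair in step}
--     streaks: dict[tuple[str, str], int] = {}
--     reversed_window = list(reversed(history_window))
--     for pair in all_pairs:
--         if pair not in reversed_window[0]:
--             streaks[pair] = 0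
--             continue
--         streak = 0
--         for step in reversed_window:
--             if pair in step:
--                 streak += 1
--             else:
--                 break
--         streaks[pair] = streak
--     return streaks
-- ===== SOURCE B (Python) =====
-- def _compute_pair_trailing_streaks(
--     history_window: list[list[tuple[str, str]]],
-- ) -> dict[tuple[str, str], int]:
--     """Single backward pass: intersect an 'alive' set step by step, incrementing
--     streaks only for pairs still alive; then read each pair's streak off the dict."""
--     if not history_window:
--         return {}
--     streaks: dict[tuple[str, str], int] = {}
--     alive = None
--     for step in reversed(history_window):
--         alive = set(step) if alive is None else alive & set(step)
--         if not alive: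
--             break
--         for p in alive:
--             streaks[p] = streaks.get(p, 0) + 1
--     order = dict.fromkeys(p for step in history_window for p in step)
--     return {p: streaks.get(p, 0) for p in order}
-- ===== Notes on version B (the rewrite author's own statement) =====
-- stated objective: faster
-- what changed: Replaced A's per-pair rescan of the reversed window (list-membership test per step per pair) by a single backward pass that intersects a shrinking 'alive' set and increments each alive pair's streak in a dict, then reads every pair's streak off that dict.
import Mathlib
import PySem

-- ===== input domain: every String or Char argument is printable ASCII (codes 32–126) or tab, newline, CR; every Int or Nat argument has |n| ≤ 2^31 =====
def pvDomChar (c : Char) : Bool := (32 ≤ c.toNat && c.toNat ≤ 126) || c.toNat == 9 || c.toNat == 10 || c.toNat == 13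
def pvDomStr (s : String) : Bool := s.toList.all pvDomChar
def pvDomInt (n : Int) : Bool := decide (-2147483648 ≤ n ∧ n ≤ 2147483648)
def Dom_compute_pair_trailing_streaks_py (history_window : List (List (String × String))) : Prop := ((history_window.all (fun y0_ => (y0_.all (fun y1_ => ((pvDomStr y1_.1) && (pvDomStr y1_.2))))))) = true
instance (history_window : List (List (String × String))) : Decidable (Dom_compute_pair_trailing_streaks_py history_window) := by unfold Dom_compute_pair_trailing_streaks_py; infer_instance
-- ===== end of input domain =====

-- B replaces A's per-pair rescan of the reversed window by one backward pass that
-- intersects an 'alive' set and increments streaks (objective: faster, asymptotic).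
-- Python A's output dict is built by iterating a set (hash order); both ports use
-- first-occurrence order, which is how dict outputs are compared (order-insensitively).

-- ===== PORT A =====
-- inner loop of A: 'streak = 0; for step in reversed_window: if pair in step: streak += 1 else: break'
def pvAStreak (pair : String × String) : List (List (String × String)) → Int → Int
  | [], streak => streak
  | step :: rest, streak =>
    if step.contains pair then pvAStreak pair rest (streak + 1) else streak

def compute_pair_trailing_streaks_py (history_window : List (List (String × String))) : List (String × String × Int) :=
  if history_window = [] then []
  else
    let all_pairs : PySem.Set (String × String) :=
      PySem.Set.ofList (history_window.flatMap (fun step => step))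
    let reversed_window := history_window.reverse
    let streaks := all_pairs.foldl
      (fun (d : PySem.Dict (String × String) Int) pair =>
        if !(reversed_window.headI.contains pair) then d.insert pair 0
        else d.insert pair (pvAStreak pair reversed_window 0))
      PySem.Dict.empty
    streaks.items.map (fun kv => (kv.1.1, kv.1.2, kv.2))

-- ===== PORT B =====
-- B's backward pass: 'for step in reversed(history_window): alive = set(step) if alive is None
-- else alive & set(step); if not alive: break; for p in alive: streaks[p] = streaks.get(p,0)+1'
def pvAltLoop : List (List (String × String)) → Option (PySem.Set (String × String)) →
    PySem.Dict (String × String) Int → PySem.Dict (String × String) Int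
  | [], _, streaks => streaks
  | step :: rest, alive?, streaks =>
    let alive := match alive? with
      | none => PySem.Set.ofList step
      | some a => PySem.Set.inter a step
    if alive.isEmpty then streaks
    else pvAltLoop rest (some alive)
      (alive.foldl (fun d p => d.insert p (d.getD p 0 + 1)) streaks)

def compute_pair_trailing_streaks_py_alt (history_window : List (List (String × String))) : List (String × String × Int) :=
  if history_window = [] then []
  else
    let streaks := pvAltLoop history_window.reverse none PySem.Dict.empty
    (PySem.List.dedup (history_window.flatMap (fun step => step))).map
      (fun p => (p.1, p.2, streaks.getD p 0))

-- ===== PRECONDITION & SPEC =====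
def Spec_compute_pair_trailing_streaks_py (history_window : List (List (String × String))) (out : List (String × String × Int)) : Prop := out = compute_pair_trailing_streaks_py_alt history_window
instance (history_window : List (List (String × String))) (out : List (String × String × Int)) : Decidable (Spec_compute_pair_trailing_streaks_py history_window out) := by unfold Spec_compute_pair_trailing_streaks_py; infer_instance

-- ===== CLAIM (what is proved, stated in full; the proofs are below) =====
def Claim_equal_compute_pair_trailing_streaks_py : Prop := ∀ (history_window : List (List (String × String))), Dom_compute_pair_trailing_streaks_py history_window → Spec_compute_pair_trailing_streaks_py history_window (compute_pair_trailing_streaks_py history_window)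

-- ===== LEMMAS AND PROOFS =====

-- accumulator form of A's inner loop
theorem pvAStreak_acc (p : String × String) (l : List (List (String × String))) (s : Int) :
    pvAStreak p l s = s + pvAStreak p l 0 := by
  induction l generalizing s with
  | nil => simp [pvAStreak]
  | cons step rest ih =>
    simp only [pvAStreak]
    split
    · rw [ih (s + 1), ih (0 + 1)]; ring
    · simp

theorem count_nodup {α : Type} [BEq α] [LawfulBEq α] (l : List α) (h : l.Nodup) (x : α) :
    (l.count x : Int) = if x ∈ l then 1 else 0 := by
  split
  · next hm => rw [List.count_eq_one_of_mem h hm]; simp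
  · next hm => rw [List.count_eq_zero_of_not_mem hm]; simp

theorem pvAltLoop_some (l : List (List (String × String))) (a : PySem.Set (String × String))
    (d : PySem.Dict (String × String) Int) (hn : a.Nodup) (p : String × String) :
    (pvAltLoop l (some a) d).getD p 0
      = d.getD p 0 + (if p ∈ a then pvAStreak p l 0 else 0) := by
  induction l generalizing a d with
  | nil => simp [pvAltLoop, pvAStreak]
  | cons step rest ih =>
    simp only [pvAltLoop]
    split
    · next he =>
      have hni : p ∉ PySem.Set.inter a step := by
        intro hm
        rw [List.isEmpty_iff.mp he] at hm
        exact (List.not_mem_nil) hm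
      rw [PySem.Set.mem_inter] at hni
      simp only [pvAStreak]
      by_cases hpa : p ∈ a
      · by_cases hps : p ∈ step
        · exact absurd ⟨hpa, hps⟩ hni
        · simp [hpa, hps]
      · simp [hpa]
    · next he =>
      rw [ih _ _ (PySem.Set.nodup_inter a step hn)]
      rw [PySem.Dict.getD_foldl_insert_add_one]
      rw [count_nodup _ (PySem.Set.nodup_inter a step hn)]
      simp only [PySem.Set.mem_inter]
      by_cases hpa : p ∈ a
      · by_cases hps : p ∈ step
        · simp only [hpa, hps, and_self, if_true, pvAStreak, List.contains_iff_mem]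
          simp only [zero_add]
          rw [pvAStreak_acc p rest 1]
          ring
        · simp [hpa, hps, pvAStreak]
      · simp [hpa]

theorem pvAltLoop_none (l : List (List (String × String)))
    (d : PySem.Dict (String × String) Int) (p : String × String) :
    (pvAltLoop l none d).getD p 0 = d.getD p 0 + pvAStreak p l 0 := by
  cases l with
  | nil => simp [pvAltLoop, pvAStreak]
  | cons step rest =>
    simp only [pvAltLoop]
    split
    · next he =>
      have hns : p ∉ step := by
        intro hm
        have : p ∈ PySem.Set.ofList step := (PySem.Set.mem_ofList step p).mpr hm
        rw [List.isEmpty_iff.mp he] at this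
        exact (List.not_mem_nil) this
      simp [pvAStreak, hns]
    · rw [pvAltLoop_some _ _ _ (PySem.Set.nodup_ofList step)]
      rw [PySem.Dict.getD_foldl_insert_add_one]
      rw [count_nodup _ (PySem.Set.nodup_ofList step)]
      simp only [PySem.Set.mem_ofList]
      by_cases hps : p ∈ step
      · simp only [hps, if_true, pvAStreak, List.contains_iff_mem]
        simp only [zero_add]
        rw [pvAStreak_acc p rest 1]
        ring
      · simp [hps, pvAStreak]

-- ===== VERDICT (by name: the statement is the Claim_ definition above) =====
theorem compute_pair_trailing_streaks_py_spec : Claim_equal_compute_pair_trailing_streaks_py := by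
  intro hw _
  show compute_pair_trailing_streaks_py hw = compute_pair_trailing_streaks_py_alt hw
  unfold compute_pair_trailing_streaks_py compute_pair_trailing_streaks_py_alt
  by_cases hempty : hw = []
  · simp [hempty]
  · simp only [if_neg hempty]
    -- collapse A's branch: if pair ∉ reversed_window[0] the inner loop returns 0 anyway
    have hbody : (fun (d : PySem.Dict (String × String) Int) pair =>
        if !(hw.reverse.headI.contains pair) then d.insert pair 0
        else d.insert pair (pvAStreak pair hw.reverse 0))
      = fun d pair => d.insert pair (pvAStreak pair hw.reverse 0) := by
      funext d pair
      split
      · next h =>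
        cases hr : hw.reverse with
        | nil => exact absurd (List.reverse_eq_nil_iff.mp hr) hempty
        | cons r0 rest =>
          have hpm : pair ∉ r0 := by
            have := h
            rw [hr] at this
            simpa using this
          simp [pvAStreak, hpm]
      · rfl
    rw [hbody]
    rw [PySem.Dict.items_foldl_insert_fresh
      (PySem.Set.ofList (hw.flatMap (fun step => step)))
      (fun p => p) (fun p => pvAStreak p hw.reverse 0) PySem.Dict.empty
      (fun a _ => PySem.Dict.contains_empty a)
      (by simp [PySem.Set.nodup_ofList])]
    simp only [PySem.Dict.empty, List.nil_append, List.map_map, PySem.List.dedup_eq_ofList]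
    apply List.map_congr_left
    intro p _
    have h := pvAltLoop_none hw.reverse (PySem.Dict.mk []) p
    rw [show (PySem.Dict.mk ([] : List ((String × String) × Int))).getD p 0 = (0 : Int) from rfl,
      zero_add] at h
    simp [h]
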